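-- pv_equiv track=rewrite | github.com/Heliumbrothers/python101 | C.1.14.py | distinct_pair
-- ===== SOURCE A (Python) =====
-- def distinct_pair(list):
--     return_list = []
--     for i in range(0, len(list) - 1):
--         for j in range(2, len(list) - 0):
--             if (i + j) % 2 == 1:
--                 return_list.append(i + j)
--     sorted(return_list)
--     return set(return_list)
-- ===== SOURCE B (Python) =====
-- def distinct_pair(list):
--     # odd sums i+j with i in [0, len-2], j in [2, len-1] are exactly the odds 3, 5, ..., 2*len-3
--     return set(range(3, 2 * len(list) - 2, 2))
-- ===== Notes on version B (the rewrite author's own statement) =====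
-- stated objective: faster
-- what changed: Replaces the O(n^2) double loop over index pairs by directly generating the arithmetic progression of odd numbers 3..2n-3, which is exactly the set A builds.
import Mathlib
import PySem

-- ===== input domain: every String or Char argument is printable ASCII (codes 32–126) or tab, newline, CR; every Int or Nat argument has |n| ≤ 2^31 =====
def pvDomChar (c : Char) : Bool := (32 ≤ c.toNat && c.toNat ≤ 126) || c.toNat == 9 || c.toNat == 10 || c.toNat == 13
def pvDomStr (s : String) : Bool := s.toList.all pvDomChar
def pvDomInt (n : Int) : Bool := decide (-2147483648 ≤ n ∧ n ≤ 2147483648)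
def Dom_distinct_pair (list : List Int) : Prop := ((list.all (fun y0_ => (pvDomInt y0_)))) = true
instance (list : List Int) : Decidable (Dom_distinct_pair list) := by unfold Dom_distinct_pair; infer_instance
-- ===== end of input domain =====

-- B replaces A's O(n^2) double loop by directly generating the odd numbers 3, 5, …, 2*len-3 (the exact set A builds).

-- ===== PORT A =====
-- literal port of A; `sorted(return_list)` discards its result in Python, so it does not affect the return value
def distinct_pair (list : List Int) : List Int :=
  let return_list :=
    (PySem.List.pyRange 0 (PySem.List.len list - 1) 1).foldl (fun acc i =>
      (PySem.List.pyRange 2 (PySem.List.len list - 0) 1).foldl (fun acc j =>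
        if PySem.Int.mod (i + j) 2 == 1 then acc ++ [i + j] else acc) acc) []
  PySem.Set.ofList return_list

-- ===== PORT B =====
def distinct_pair_alt (list : List Int) : List Int :=
  PySem.Set.ofList (PySem.List.pyRange 3 (2 * PySem.List.len list - 2) 2)

-- ===== PRECONDITION & SPEC =====
def Spec_distinct_pair (list : List Int) (out : List Int) : Prop := out = distinct_pair_alt list
instance (list : List Int) (out : List Int) : Decidable (Spec_distinct_pair list out) := by unfold Spec_distinct_pair; infer_instance

-- ===== CLAIM (what is proved, stated in full; the proofs are below) =====
def Claim_equal_distinct_pair : Prop := ∀ (list : List Int), Dom_distinct_pair list → Spec_distinct_pair list (distinct_pair list)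

-- ===== LEMMAS AND PROOFS =====

-- the inner loop of A, as a list: the odd sums i+j for j in range(2, n)
def pvBlk (n i : Int) : List Int :=
  ((PySem.List.pyRange 2 n 1).filter (fun j => PySem.Int.mod (i + j) 2 == 1)).map (fun j => i + j)

-- the odd numbers 3, 5, …, 3+2(c-1)
def pvOdds (c : Nat) : List Int := List.map (fun k : Nat => 3 + 2 * (k : Int)) (List.range c)

theorem pvMem_blk (n i y : Int) : y ∈ pvBlk n i ↔ i + 2 ≤ y ∧ y < i + n ∧ y % 2 = 1 := by
  simp only [pvBlk, List.mem_map, List.mem_filter, PySem.List.mem_pyRange_one]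
  constructor
  · rintro ⟨j, ⟨⟨h2, hn⟩, hm⟩, rfl⟩
    rw [PySem.Int.mod_eq_emod_of_pos (by norm_num), beq_iff_eq] at hm
    omega
  · rintro ⟨h2, hn, hm⟩
    exact ⟨y - i, ⟨⟨by omega, by omega⟩, by
      rw [PySem.Int.mod_eq_emod_of_pos (by norm_num), beq_iff_eq]; omega⟩, by omega⟩

theorem pvNodup_blk (n i : Int) : (pvBlk n i).Nodup := by
  apply List.Nodup.map (fun a b h => by omega)
  exact (PySem.List.nodup_pyRange_one 2 n).filter _

theorem pvMem_odds (c : Nat) (y : Int) : y ∈ pvOdds c ↔ 3 ≤ y ∧ y < 3 + 2 * (c : Int) ∧ y % 2 = 1 := by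
  simp only [pvOdds, List.mem_map, List.mem_range]
  constructor
  · rintro ⟨k, hk, rfl⟩; omega
  · rintro ⟨h3, hc, hm⟩
    refine ⟨((y - 3) / 2).toNat, by omega, by omega⟩

theorem pvOdds_succ (c : Nat) : pvOdds (c + 1) = pvOdds c ++ [3 + 2 * (c : Int)] := by
  simp [pvOdds, List.range_succ]

theorem pvNodup_odds (c : Nat) : (pvOdds c).Nodup := by
  unfold pvOdds
  apply List.Nodup.map _ List.nodup_range
  intro a b h
  simpa using h

theorem pvIntNatDiv (a : Nat) : ((a : Int) / 2).toNat = a / 2 := by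
  omega

-- filter keeping exactly one element of a nodup list
theorem pvFilter_eq_singleton {l : List Int} {p : Int → Bool} {x : Int}
    (hnd : l.Nodup) (hx : x ∈ l) (hpx : p x = true)
    (huniq : ∀ y ∈ l, p y = true → y = x) : l.filter p = [x] := by
  induction l with
  | nil => cases hx
  | cons a l ih =>
    rcases List.mem_cons.mp hx with rfl | hx'
    · rw [List.filter_cons_of_pos hpx]
      have : l.filter p = [] := List.filter_eq_nil_iff.mpr (fun y hy hpy => by
        have := huniq y (List.mem_cons_of_mem _ hy) hpy
        subst this
        exact absurd hy (List.nodup_cons.mp hnd).1)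
      rw [this]
    · have hpa : ¬ p a = true := fun hpa => by
        have := huniq a List.mem_cons_self hpa
        subst this
        exact (List.nodup_cons.mp hnd).1 hx'
      rw [List.filter_cons_of_neg (by simpa using hpa)]
      exact ih (List.nodup_cons.mp hnd).2 hx' (fun y hy => huniq y (List.mem_cons_of_mem _ hy))

-- block 0 itself is the list of odds below m
theorem pvBlk0 (m : Nat) : pvBlk (m : Int) 0 = pvOdds ((m - 2) / 2) := by
  induction m with
  | zero =>
    simp [pvBlk, PySem.List.pyRange_one_eq_nil (by norm_num : (0:Int) ≤ 2), pvOdds]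
  | succ m ih =>
    by_cases hm : m < 2
    · have h0 : PySem.List.pyRange 2 ((m : Int) + 1) 1 = [] :=
        PySem.List.pyRange_one_eq_nil (by omega)
      unfold pvBlk
      rw [show ((m + 1 : Nat) : Int) = (m : Int) + 1 by push_cast; ring, h0]
      simp [pvOdds]
      omega
    · have hm2 : 2 ≤ m := by omega
      have hcast : ((m + 1 : Nat) : Int) = (m : Int) + 1 := by push_cast; ring
      rw [pvBlk, hcast, PySem.List.pyRange_one_succ_right (by exact_mod_cast hm2),
        List.filter_append, List.map_append]
      rw [show ((PySem.List.pyRange 2 (m:Int) 1).filter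
            (fun j => PySem.Int.mod (0 + j) 2 == 1)).map (fun j => (0:Int) + j) = pvBlk (m:Int) 0 from rfl]
      rw [ih]
      by_cases hpar : m % 2 = 1
      · have hfil : (PySem.Int.mod (0 + (m:Int)) 2 == 1) = true := by
          rw [PySem.Int.mod_eq_emod_of_pos (by norm_num), beq_iff_eq]; omega
        simp only [List.filter_cons, List.filter_nil, hfil, if_true, List.map_cons, List.map_nil]
        have h1 : (m + 1 - 2) / 2 = (m - 2) / 2 + 1 := by omega
        rw [h1, pvOdds_succ]
        have h2 : (0:Int) + (m:Int) = 3 + 2 * (((m - 2) / 2 : Nat) : Int) := by omega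
        rw [h2]
      · have hfil : (PySem.Int.mod (0 + (m:Int)) 2 == 1) = false := by
          rw [PySem.Int.mod_eq_emod_of_pos (by norm_num)]
          simp only [beq_eq_false_iff_ne, ne_eq]
          omega
        simp only [List.filter_cons, List.filter_nil, hfil, Bool.false_eq_true, if_false,
          List.map_nil, List.append_nil]
        congr 1
        omega

-- one outer step: adding block t to the set of odds collected so far
theorem pvStep (m t : Nat) (ht1 : 1 ≤ t) (ht2 : t + 1 ≤ m - 1) :
    PySem.Set.update (pvOdds ((t + m - 3) / 2)) (pvBlk (m : Int) (t : Int)) =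
      pvOdds ((t + m - 2) / 2) := by
  have hm3 : 3 ≤ m := by omega
  set c := (t + m - 3) / 2 with hc
  rw [PySem.Set.update_eq_append_filter,
    PySem.Set.ofList_eq_self_of_nodup _ (pvNodup_blk _ _)]
  have key : ∀ y : Int, (!PySem.Set.contains (pvOdds c) y) = true ↔ y ∉ pvOdds c := by
    intro y
    simp
  by_cases hpar : (t + m) % 2 = 0
  · -- t+m even: exactly one new element, t+m-1
    have h2c : 2 * c = t + m - 4 := by omega
    have hfil : (pvBlk (m:Int) (t:Int)).filter
        (fun y => !PySem.Set.contains (pvOdds c) y) = [(t:Int) + (m:Int) - 1] := by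
      apply pvFilter_eq_singleton (pvNodup_blk _ _)
      · rw [pvMem_blk]; omega
      · refine (key _).mpr ?_
        intro hmem
        rw [pvMem_odds] at hmem
        omega
      · intro y hy hpy
        rw [pvMem_blk] at hy
        have hno := (key y).mp hpy
        rw [pvMem_odds] at hno
        omega
    rw [hfil]
    have hval : (t:Int) + (m:Int) - 1 = 3 + 2 * (c : Int) := by omega
    rw [hval, ← pvOdds_succ]
    congr 1
    omega
  · -- t+m odd: nothing new
    have h2c : 2 * c = t + m - 3 := by omega
    have hfil : (pvBlk (m:Int) (t:Int)).filter
        (fun y => !PySem.Set.contains (pvOdds c) y) = [] := by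
      rw [List.filter_eq_nil_iff]
      intro y hy
      rw [pvMem_blk] at hy
      intro hp
      have hno := (key y).mp hp
      rw [pvMem_odds] at hno
      omega
    rw [hfil, List.append_nil]
    congr 1
    omega

-- the outer loop, first t iterations
theorem pvMain (m t : Nat) (ht1 : 1 ≤ t) (ht2 : t ≤ m - 1) :
    PySem.Set.ofList (List.flatMap (pvBlk (m : Int)) (PySem.List.pyRange 0 (t : Int) 1)) =
      pvOdds ((t + m - 3) / 2) := by
  induction t with
  | zero => omega
  | succ t ih =>
    by_cases ht : t = 0
    · subst ht
      rw [show ((0:Nat) + 1 : Nat) = (1:Nat) from rfl]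
      rw [show ((1:Nat) : Int) = 0 + 1 from rfl, PySem.List.pyRange_one_singleton]
      simp only [List.flatMap_cons, List.flatMap_nil, List.append_nil]
      rw [PySem.Set.ofList_eq_self_of_nodup _ (pvNodup_blk _ _)]
      rw [pvBlk0]
      congr 1
      omega
    · have ht1' : 1 ≤ t := by omega
      have hcast : ((t + 1 : Nat) : Int) = (t : Int) + 1 := by push_cast; ring
      rw [hcast, PySem.List.pyRange_one_succ_right (by positivity), List.flatMap_append]
      simp only [List.flatMap_cons, List.flatMap_nil, List.append_nil]
      rw [PySem.Set.ofList_append, ih ht1' (by omega), pvStep m t ht1' ht2]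
      congr 1
      omega

-- B's range of odds is already duplicate-free and equals pvOdds (m-2)
theorem pvAltEq (m : Nat) :
    PySem.Set.ofList (PySem.List.pyRange 3 (2 * (m : Int) - 2) 2) = pvOdds (m - 2) := by
  have hrep : PySem.List.pyRange 3 (2 * (m : Int) - 2) 2 = pvOdds (m - 2) := by
    rw [PySem.List.pyRange_of_pos 3 (2 * (m : Int) - 2) (by norm_num)]
    unfold pvOdds
    congr 1
    split_ifs with h
    · have e1 : 2 * (m:Int) - 2 - 3 + 2 - 1 = ((2 * m - 4 : Nat) : Int) := by omega
      rw [e1, pvIntNatDiv]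
      congr 1
      omega
    · congr 1
      omega
  rw [hrep, PySem.Set.ofList_eq_self_of_nodup _ (pvNodup_odds _)]

-- ===== VERDICT (by name: the statement is the Claim_ definition above) =====
theorem distinct_pair_spec : Claim_equal_distinct_pair := by
  intro list _
  unfold Spec_distinct_pair distinct_pair distinct_pair_alt
  set m : Nat := list.length with hm
  have hlen : PySem.List.len list = (m : Int) := by rw [hm]; simp [PySem.List.len]
  rw [hlen]
  simp only []
  -- turn the nested loops into a flatMap of blocks
  have hinner : ∀ (i : Int) (acc : List Int),
      (PySem.List.pyRange 2 ((m:Int) - 0) 1).foldl (fun acc j =>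
        if PySem.Int.mod (i + j) 2 == 1 then acc ++ [i + j] else acc) acc
      = acc ++ pvBlk (m : Int) i := by
    intro i acc
    rw [show (m:Int) - 0 = (m:Int) by ring]
    exact PySem.List.foldl_append_if (fun j => PySem.Int.mod (i + j) 2 == 1) (fun j => i + j) _ acc
  rw [funext fun acc => funext fun i => hinner i acc,
    PySem.List.foldl_append_eq_flatMap (pvBlk (m:Int)) _ [], List.nil_append]
  rw [pvAltEq]
  by_cases hm2 : m ≤ 1
  · rw [PySem.List.pyRange_one_eq_nil (by omega : (m:Int) - 1 ≤ 0)]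
    rw [show pvOdds (m - 2) = pvOdds 0 by congr 1; omega]
    rfl
  · have : ((m - 1 : Nat) : Int) = (m : Int) - 1 := by omega
    rw [← this, pvMain m (m - 1) (by omega) (by omega)]
    congr 1
    omega
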